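-- pv_equiv track=rewrite | github.com/iodike/ChronoKGE | chrono_kge/knowledge/chrono/timestamp.py | years_to_days
-- ===== SOURCE A (Python) =====
-- def years_to_days(years: int) -> int:
--     """"""
--     days = 0
--
--     for y in range(1, years + 1):
--         days += 365
--
--         if y % 400 == 0:
--             days += 1
--         elif y % 100 == 0:
--             continue
--         elif y % 4 == 0:
--             days += 1
--         else:
--             continue
--
--     return days
-- ===== SOURCE B (Python) =====
-- def years_to_days(years: int) -> int:
--     if years <= 0:
--         return 0
--     return 365 * years + years // 4 - years // 100 + years // 400
-- ===== Notes on version B (the rewrite author's own statement) =====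
-- stated objective: faster
-- what changed: Replaced the per-year loop with the closed-form leap-day count 365*y + y//4 - y//100 + y//400 (0 for non-positive years).
import Mathlib
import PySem

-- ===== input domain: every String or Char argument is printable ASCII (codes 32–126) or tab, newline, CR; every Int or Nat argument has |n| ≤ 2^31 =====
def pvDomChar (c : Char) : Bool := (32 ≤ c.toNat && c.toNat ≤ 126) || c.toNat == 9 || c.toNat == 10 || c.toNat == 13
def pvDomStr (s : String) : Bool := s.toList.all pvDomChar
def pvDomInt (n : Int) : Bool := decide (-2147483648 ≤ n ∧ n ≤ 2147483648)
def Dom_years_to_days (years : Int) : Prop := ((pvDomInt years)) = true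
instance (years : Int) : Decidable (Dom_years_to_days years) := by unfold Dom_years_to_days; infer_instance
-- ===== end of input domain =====

-- B replaces A's per-year loop with the closed-form leap count 365*y + y//4 - y//100 + y//400 (faster: O(1) vs O(n)).

-- ===== PORT A =====
-- loop body of A (the `for` body, in branch order)
def ytdStep (days y : Int) : Int :=
  let days := days + 365
  if PySem.Int.mod y 400 = 0 then days + 1
  else if PySem.Int.mod y 100 = 0 then days
  else if PySem.Int.mod y 4 = 0 then days + 1
  else days

-- the `for y in range(1, years+1)` loop as tail recursion over the same state (days, y)
def ytdGo : Nat → Int → Int → Int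
  | 0, _, days => days
  | n + 1, y, days => ytdGo n (y + 1) (ytdStep days y)

def years_to_days (years : Int) : Int :=
  ytdGo ((years + 1) - 1).toNat 1 0

-- ===== PORT B =====
def years_to_days_alt (years : Int) : Int :=
  if years ≤ 0 then 0
  else 365 * years + PySem.Int.floordiv years 4
        - PySem.Int.floordiv years 100 + PySem.Int.floordiv years 400

-- ===== PRECONDITION & SPEC =====
def Spec_years_to_days (years : Int) (out : Int) : Prop := out = years_to_days_alt years
instance (years : Int) (out : Int) : Decidable (Spec_years_to_days years out) := by unfold Spec_years_to_days; infer_instance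

-- ===== CLAIM (what is proved, stated in full; the proofs are below) =====
def Claim_equal_years_to_days : Prop := ∀ (years : Int), Dom_years_to_days years → Spec_years_to_days years (years_to_days years)

-- ===== LEMMAS AND PROOFS =====

theorem ytdGo_nat (n : Nat) :
    ytdGo n 1 0 =
      365 * (n : Int) + ((n / 4 : Nat) : Int) - ((n / 100 : Nat) : Int) + ((n / 400 : Nat) : Int) := by
  suffices h : ∀ (n : Nat) (days : Int),
      ytdGo n 1 days = days + 365 * (n : Int) + ((n / 4 : Nat) : Int)
        - ((n / 100 : Nat) : Int) + ((n / 400 : Nat) : Int) by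
    simpa using h n 0
  -- peel the LAST iteration: ytdGo (n+1) 1 days = ytdStep (ytdGo n 1 days) (n+1)
  have peel : ∀ (n : Nat) (y days : Int),
      ytdGo (n + 1) y days = ytdStep (ytdGo n y days) (y + n) := by
    intro n
    induction n with
    | zero => intro y days; simp [ytdGo]
    | succ m ih =>
      intro y days
      show ytdGo (m + 1) (y + 1) (ytdStep days y) = _
      rw [ih (y + 1) (ytdStep days y)]
      simp [ytdGo]
      ring_nf
  intro n
  induction n with
  | zero => intro days; simp [ytdGo]
  | succ n ih =>
    intro days
    rw [peel n 1 days, ih days]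
    have h400 : PySem.Int.mod ((1 : Int) + n) 400 = (((n + 1) % 400 : Nat) : Int) := by
      rw [add_comm (1 : Int) (n : Int)]
      have := PySem.Int.mod_natCast (n + 1) 400; push_cast at this ⊢; omega
    have h100 : PySem.Int.mod ((1 : Int) + n) 100 = (((n + 1) % 100 : Nat) : Int) := by
      rw [add_comm (1 : Int) (n : Int)]
      have := PySem.Int.mod_natCast (n + 1) 100; push_cast at this ⊢; omega
    have h4 : PySem.Int.mod ((1 : Int) + n) 4 = (((n + 1) % 4 : Nat) : Int) := by
      rw [add_comm (1 : Int) (n : Int)]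
      have := PySem.Int.mod_natCast (n + 1) 4; push_cast at this ⊢; omega
    simp only [ytdStep, h400, h100, h4]
    split_ifs with a b c
    · push_cast at a ⊢; omega
    · push_cast at a b ⊢; omega
    · push_cast at a b c ⊢; omega
    · push_cast at a b c ⊢; omega

theorem years_to_days_eq (years : Int) : years_to_days years = years_to_days_alt years := by
  unfold years_to_days
  by_cases h : years ≤ 0
  · have : ((years + 1) - 1).toNat = 0 := by omega
    rw [this]
    simp [ytdGo, years_to_days_alt, h]
  · obtain ⟨n, rfl⟩ : ∃ n : Nat, years = (n : Int) := ⟨years.toNat, by omega⟩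
    have : (((n : Int) + 1) - 1).toNat = n := by omega
    rw [this, ytdGo_nat]
    unfold years_to_days_alt
    rw [if_neg h]
    have d4 : PySem.Int.floordiv (n : Int) 4 = ((n / 4 : Nat) : Int) := PySem.Int.floordiv_natCast n 4
    have d100 : PySem.Int.floordiv (n : Int) 100 = ((n / 100 : Nat) : Int) := PySem.Int.floordiv_natCast n 100
    have d400 : PySem.Int.floordiv (n : Int) 400 = ((n / 400 : Nat) : Int) := PySem.Int.floordiv_natCast n 400
    push_cast at d4 d100 d400 ⊢
    omega

-- ===== VERDICT (by name: the statement is the Claim_ definition above) =====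
theorem years_to_days_spec : Claim_equal_years_to_days := by
  intro years _
  exact years_to_days_eq years
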